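-- pv_equiv track=rewrite | github.com/jm154/aii_ws | src/f1tenth-software-stack/pure_pursuit/scripts/pure_pursuit_node(arcarc_recover).py | _collect_true_runs
-- ===== SOURCE A (Python) =====
-- def _collect_true_runs(mask_bool):
--     """Collect contiguous True runs (closed intervals) on a linearized array."""
--     runs = []
--     N = len(mask_bool)
--     i = 0
--     while i < N:
--         if mask_bool[i]:
--             s = i
--             while i + 1 < N and mask_bool[i + 1]:
--                 i += 1
--             e = i
--             runs.append((s, e))
--         i += 1
--     return runs
-- ===== SOURCE B (Python) =====
-- def _collect_true_runs(mask_bool):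
--     """Collect contiguous True runs (closed intervals) on a linearized array."""
--     runs = []
--     start = None
--     for i, v in enumerate(mask_bool):
--         if v:
--             if start is None:
--                 start = i
--         elif start is not None:
--             runs.append((start, i - 1))
--             start = None
--     if start is not None:
--         runs.append((start, len(mask_bool) - 1))
--     return runs
-- ===== Notes on version B (the rewrite author's own statement) =====
-- stated objective: simpler
-- what changed: Replaced the nested while loops (outer scan plus inner skip-ahead over a run) by one flat enumerate pass maintaining an optional open-run start, flushed after the loop.
import Mathlib
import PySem

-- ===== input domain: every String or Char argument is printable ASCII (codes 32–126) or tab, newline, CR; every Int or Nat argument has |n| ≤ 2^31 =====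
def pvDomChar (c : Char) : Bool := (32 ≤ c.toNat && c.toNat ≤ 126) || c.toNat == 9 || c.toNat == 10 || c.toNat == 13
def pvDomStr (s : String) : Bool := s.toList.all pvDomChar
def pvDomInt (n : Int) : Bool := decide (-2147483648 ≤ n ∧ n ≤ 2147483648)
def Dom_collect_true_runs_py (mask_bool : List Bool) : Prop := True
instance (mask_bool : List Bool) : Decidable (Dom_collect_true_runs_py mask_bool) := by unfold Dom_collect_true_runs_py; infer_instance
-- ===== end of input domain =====

-- B replaces A's nested while loops (outer scan + inner skip-ahead over each run) by one flat
-- enumerate pass keeping an optional open-run start, flushed after the loop (objective: simpler).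

-- ===== PORT A =====
-- inner `while i + 1 < N and mask_bool[i + 1]: i += 1` of A, returning the final i
def skipA (mask : List Bool) (i : Nat) : Nat :=
  if h : i + 1 < mask.length then
    if mask[i+1] then skipA mask (i + 1) else i
  else i
termination_by mask.length - i

-- needed by the outer loop's termination: the inner skip never moves i backwards
theorem le_skipA (mask : List Bool) (i : Nat) : i ≤ skipA mask i := by
  rw [skipA]
  split
  · split
    · exact le_trans (Nat.le_succ i) (le_skipA mask (i + 1))
    · exact le_refl i
  · exact le_refl i
termination_by mask.length - i

-- outer `while i < N` of A
def loopA (mask : List Bool) (i : Nat) : List (Int × Int) :=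
  if h : i < mask.length then
    if mask[i] then
      let e := skipA mask i
      ((i : Int), (e : Int)) :: loopA mask (e + 1)
    else
      loopA mask (i + 1)
  else []
termination_by mask.length - i
decreasing_by
  · have := le_skipA mask i; omega
  · omega

def collect_true_runs_py (mask_bool : List Bool) : List (Int × Int) :=
  loopA mask_bool 0

-- ===== PORT B =====
-- one step of B's for-loop over enumerate: state = (runs so far, optional open-run start)
def stepB (st : List (Int × Int) × Option Int) (p : Int × Bool) : List (Int × Int) × Option Int :=
  if p.2 then
    match st.2 with
    | none => (st.1, some p.1)
    | some _ => st
  else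
    match st.2 with
    | some s => (st.1 ++ [(s, p.1 - 1)], none)
    | none => st

def collect_true_runs_py_alt (mask_bool : List Bool) : List (Int × Int) :=
  let r := (PySem.List.enumerate mask_bool 0).foldl stepB ([], none)
  match r.2 with
  | some s => r.1 ++ [(s, (mask_bool.length : Int) - 1)]
  | none => r.1

-- ===== PRECONDITION & SPEC =====
def Spec_collect_true_runs_py (mask_bool : List Bool) (out : List (Int × Int)) : Prop := out = collect_true_runs_py_alt mask_bool
instance (mask_bool : List Bool) (out : List (Int × Int)) : Decidable (Spec_collect_true_runs_py mask_bool out) := by unfold Spec_collect_true_runs_py; infer_instance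

-- ===== CLAIM (what is proved, stated in full; the proofs are below) =====
def Claim_equal_collect_true_runs_py : Prop := ∀ (mask_bool : List Bool), Dom_collect_true_runs_py mask_bool → Spec_collect_true_runs_py mask_bool (collect_true_runs_py mask_bool)

-- ===== LEMMAS AND PROOFS =====

-- common reference state machine: position i, optional open-run start, remaining suffix
def pvRun (i : Int) (st : Option Int) : List Bool → List (Int × Int)
  | [] =>
    match st with
    | some s => [(s, i - 1)]
    | none => []
  | b :: t =>
    if b then
      match st with
      | none => pvRun (i + 1) (some i) t
      | some s => pvRun (i + 1) (some s) t
    else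
      match st with
      | some s => (s, i - 1) :: pvRun (i + 1) none t
      | none => pvRun (i + 1) none t

theorem B_fold (l : List Bool) (i : Int) (st : Option Int) (runs : List (Int × Int)) :
    (match (PySem.List.enumerate l i).foldl stepB (runs, st) with
     | (rs, some s) => rs ++ [(s, i + l.length - 1)]
     | (rs, none) => rs) = runs ++ pvRun i st l := by
  induction l generalizing i st runs with
  | nil =>
    cases st with
    | none => simp [PySem.List.enumerate, pvRun]
    | some s => simp [PySem.List.enumerate, pvRun]
  | cons b t ih =>
    rw [PySem.List.enumerate_cons]
    cases b with
    | true =>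
      cases st with
      | none =>
        have h := ih (i + 1) (some i) runs
        simp only [List.foldl_cons, stepB, pvRun]
        have harith : i + ((t.length : Int) + 1) - 1 = (i + 1) + (t.length : Int) - 1 := by ring
        simp only [List.length_cons]
        push_cast
        rw [harith]
        exact h
      | some s =>
        have h := ih (i + 1) (some s) runs
        simp only [List.foldl_cons, stepB, pvRun]
        have harith : i + ((t.length : Int) + 1) - 1 = (i + 1) + (t.length : Int) - 1 := by ring
        simp only [List.length_cons]
        push_cast
        rw [harith]
        exact h
    | false =>
      cases st with
      | none =>
        have h := ih (i + 1) none runs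
        simp only [List.foldl_cons, stepB, pvRun]
        have harith : i + ((t.length : Int) + 1) - 1 = (i + 1) + (t.length : Int) - 1 := by ring
        simp only [List.length_cons]
        push_cast
        rw [harith]
        exact h
      | some s =>
        have h := ih (i + 1) none (runs ++ [(s, i - 1)])
        simp only [List.foldl_cons, stepB, pvRun]
        have harith : i + ((t.length : Int) + 1) - 1 = (i + 1) + (t.length : Int) - 1 := by ring
        simp only [List.length_cons]
        push_cast
        rw [harith, h, List.append_assoc]
        simp

theorem skip_run (mask : List Bool) (e : Nat) (s : Int) :
    pvRun ((e : Int) + 1) (some s) (mask.drop (e + 1)) =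
      (s, ((skipA mask e : Nat) : Int)) ::
        pvRun (((skipA mask e : Nat) : Int) + 1) none (mask.drop (skipA mask e + 1)) := by
  rw [skipA]
  split
  · next h =>
    rw [List.drop_eq_getElem_cons h]
    split
    · next hb =>
      have := skip_run mask (e + 1) s
      simp only [pvRun, hb, if_pos]
      push_cast at this ⊢
      convert this using 2
    · next hb =>
      have hb' : mask[e+1] = false := by simpa using hb
      simp only [pvRun, hb', if_neg Bool.false_ne_true]
      rw [List.drop_eq_getElem_cons h]
      simp only [pvRun, hb', if_neg Bool.false_ne_true]
      norm_num
  · next h =>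
    have hd : mask.drop (e + 1) = [] := List.drop_eq_nil_of_le (by omega)
    rw [hd]
    simp [pvRun]
termination_by mask.length - e
decreasing_by omega

theorem loopA_eq (mask : List Bool) (i : Nat) :
    loopA mask i = pvRun (i : Int) none (mask.drop i) := by
  fun_induction loopA mask i with
  | case1 i h hb e ih =>
    rw [List.drop_eq_getElem_cons h]
    simp only [pvRun, hb, if_pos]
    rw [skip_run mask i, ih]
    push_cast
    rfl
  | case2 i h hb ih =>
    have hb' : mask[i] = false := by simpa using hb
    rw [List.drop_eq_getElem_cons h]
    simp only [pvRun, hb', if_neg Bool.false_ne_true]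
    rw [ih]
    push_cast
    ring_nf
  | case3 i h =>
    rw [List.drop_eq_nil_of_le (by omega)]
    simp [pvRun]

-- ===== VERDICT (by name: the statement is the Claim_ definition above) =====
theorem collect_true_runs_py_spec : Claim_equal_collect_true_runs_py := by
  intro mask _
  unfold Spec_collect_true_runs_py collect_true_runs_py collect_true_runs_py_alt
  have hB := B_fold mask 0 none []
  have hA := loopA_eq mask 0
  simp only [List.drop_zero, Nat.cast_zero] at hA
  simp only [zero_add, List.nil_append] at hB
  rw [hA, ← hB]
  rcases hfold : (PySem.List.enumerate mask 0).foldl stepB ([], none) with ⟨rs, st⟩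
  cases st <;> simp
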